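-- pv_equiv track=rewrite | github.com/imazen/all-the-images | scripts/generate_sources.py | gen_noise_patches
-- ===== SOURCE A (Python) =====
-- def lcg(seed: int) -> tuple[int, int]:
--     """Linear congruential generator matching the Rust version."""
--     seed = (seed * 6364136223846793005 + 1442695040888963407) & 0xFFFFFFFFFFFFFFFF
--     return seed, (seed >> 33) & 0xFF
--
-- def gen_noise(w: int, h: int, c: int, seed: int, maxval: int = 255) -> list[int]:
--     """Uniform random pixels scaled to maxval."""
--     s = seed
--     out = []
--     for _ in range(w * h * c):
--         s, val = lcg(s)
--         out.append((val * maxval) // 255)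
--     return out
--
-- def gen_noise_patches(w: int, h: int, c: int, seed: int, maxval: int = 255) -> list[int]:
--     """Random noise with solid-color rectangular patches overlaid."""
--     out = gen_noise(w, h, c, seed, maxval)
--     s = seed ^ 0xDEADBEEF
--     s, n_extra = lcg(s)
--     n_patches = 6 + (n_extra % 6)
--     for _ in range(n_patches):
--         s, px = lcg(s); px = px % w
--         s, py = lcg(s); py = py % h
--         s, pw = lcg(s); pw = 1 + (pw % max(w // 3, 1))
--         s, ph = lcg(s); ph = 1 + (ph % max(h // 3, 1))
--         col = []
--         for _ in range(3):
--             s, v = lcg(s)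
--             col.append((v * maxval) // 255)
--         for y in range(py, min(py + ph, h)):
--             for x in range(px, min(px + pw, w)):
--                 idx = (y * w + x) * c
--                 for k in range(c):
--                     out[idx + k] = col[min(k, 2)]
--     return out
-- ===== SOURCE B (Python) =====
-- def lcg(seed: int) -> tuple[int, int]:
--     seed = (seed * 6364136223846793005 + 1442695040888963407) & 0xFFFFFFFFFFFFFFFF
--     return seed, (seed >> 33) & 0xFF
--
-- def gen_noise_patches(w: int, h: int, c: int, seed: int, maxval: int = 255) -> list[int]:
--     """Random noise with solid-color rectangular patches overlaid.
--
--     Drains the patch stream first into a list of clipped patch rectangles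
--     (most recent first, empty ones dropped), then emits every output sample
--     in one flat pass: the noise LCG always advances, and each pixel is
--     resolved by finding the first covering rectangle in that list (i.e. the
--     last patch drawn over it), instead of mutating a buffer."""
--     s = seed ^ 0xDEADBEEF
--     s, n_extra = lcg(s)
--     patches = []
--     for _ in range(6 + (n_extra % 6)):
--         s, px = lcg(s); px %= w
--         s, py = lcg(s); py %= h
--         s, pw = lcg(s); pw = 1 + (pw % max(w // 3, 1))
--         s, ph = lcg(s); ph = 1 + (ph % max(h // 3, 1))
--         col = []
--         for _ in range(3):
--             s, v = lcg(s)
--             col.append((v * maxval) // 255)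
--         patches.append((px, py, pw, ph, col))
--     rev = [(px, min(px + pw, w), py, min(py + ph, h), col)
--            for px, py, pw, ph, col in reversed(patches)]
--     rev = [r for r in rev if r[0] < r[1] and r[2] < r[3]]
--     out = []
--     s = seed
--     for i in range(w * h * c):
--         s, v = lcg(s)
--         x = i // c % w
--         y = i // c // w
--         col = None
--         for x0, x1, y0, y1, pc in rev:
--             if x0 <= x and x < x1 and y0 <= y and y < y1:
--                 col = pc
--                 break
--         out.append(col[min(i % c, 2)] if col is not None else (v * maxval) // 255)
--     return out
-- ===== Notes on version B (the rewrite author's own statement) =====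
-- stated objective: alternative
-- what changed: Instead of filling the whole noise buffer and then mutating rectangular sub-ranges patch by patch, B first drains the patch stream into a list of patch records, then emits the output in a single flat pass: the noise LCG advances for every sample, and each pixel is resolved by scanning the collected patches in reverse for the last one covering it (last writer wins), with no buffer mutation.
import Mathlib
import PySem

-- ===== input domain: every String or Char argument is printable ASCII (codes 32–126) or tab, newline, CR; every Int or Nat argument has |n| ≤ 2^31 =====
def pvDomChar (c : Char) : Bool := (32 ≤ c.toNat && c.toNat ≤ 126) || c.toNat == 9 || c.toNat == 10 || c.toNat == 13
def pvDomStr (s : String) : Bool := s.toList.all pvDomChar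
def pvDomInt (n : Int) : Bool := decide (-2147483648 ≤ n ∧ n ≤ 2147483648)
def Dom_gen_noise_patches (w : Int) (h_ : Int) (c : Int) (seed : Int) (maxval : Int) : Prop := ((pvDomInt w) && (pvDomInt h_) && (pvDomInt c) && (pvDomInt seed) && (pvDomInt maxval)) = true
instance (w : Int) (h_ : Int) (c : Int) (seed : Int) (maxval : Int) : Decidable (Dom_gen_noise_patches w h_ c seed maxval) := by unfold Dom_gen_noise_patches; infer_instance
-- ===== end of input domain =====

-- B drains the patch stream into a coverage dictionary (x,y)->color first (last patch wins),
-- then emits all samples in one flat pass, substituting covered pixels; alternative decomposition, not faster.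


-- ===== PORT A =====
def pvLcg (s : Int) : Int × Int :=
  let s2 := PySem.Int.band (s * 6364136223846793005 + 1442695040888963407) 0xFFFFFFFFFFFFFFFF
  (s2, PySem.Int.band (s2 >>> (33 : Nat)) 0xFF)

def pvGenNoise (w : Int) (h_ : Int) (c : Int) (seed : Int) (maxval : Int) : List Int :=
  ((PySem.List.pyRange 0 (w * h_ * c) 1).foldl
    (fun (st : Int × List Int) _ =>
      ((pvLcg st.1).1, st.2 ++ [PySem.Int.floordiv ((pvLcg st.1).2 * maxval) 255]))
    (seed, [])).2

def gen_noise_patches (w : Int) (h_ : Int) (c : Int) (seed : Int) (maxval : Int) : List Int :=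
  ((PySem.List.pyRange 0 (6 + PySem.Int.mod (pvLcg (PySem.Int.bxor seed 0xDEADBEEF)).2 6) 1).foldl
    (fun (st : Int × List Int) _ =>
      let q1 := pvLcg st.1
      let px := PySem.Int.mod q1.2 w
      let q2 := pvLcg q1.1
      let py := PySem.Int.mod q2.2 h_
      let q3 := pvLcg q2.1
      let pw := 1 + PySem.Int.mod q3.2 (max (PySem.Int.floordiv w 3) 1)
      let q4 := pvLcg q3.1
      let ph := 1 + PySem.Int.mod q4.2 (max (PySem.Int.floordiv h_ 3) 1)
      let cs := (PySem.List.pyRange 0 3 1).foldl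
        (fun (t : Int × List Int) _ =>
          ((pvLcg t.1).1, t.2 ++ [PySem.Int.floordiv ((pvLcg t.1).2 * maxval) 255])) (q4.1, [])
      let out' := (PySem.List.pyRange py (min (py + ph) h_) 1).foldl (fun o y =>
        (PySem.List.pyRange px (min (px + pw) w) 1).foldl (fun o2 x =>
          let idx := (y * w + x) * c
          (PySem.List.pyRange 0 c 1).foldl (fun o3 k =>
            PySem.List.pySetD o3 (idx + k) (PySem.List.pyGetD cs.2 (min k 2) 0)) o2) o) st.2
      (cs.1, out'))
    ((pvLcg (PySem.Int.bxor seed 0xDEADBEEF)).1, pvGenNoise w h_ c seed maxval)).2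

-- ===== PORT B =====
def gen_noise_patches_alt (w : Int) (h_ : Int) (c : Int) (seed : Int) (maxval : Int) : List Int :=
  let patches := ((PySem.List.pyRange 0 (6 + PySem.Int.mod (pvLcg (PySem.Int.bxor seed 0xDEADBEEF)).2 6) 1).foldl
    (fun (st : Int × List (Int × Int × Int × Int × List Int)) _ =>
      let q1 := pvLcg st.1
      let px := PySem.Int.mod q1.2 w
      let q2 := pvLcg q1.1
      let py := PySem.Int.mod q2.2 h_
      let q3 := pvLcg q2.1
      let pw := 1 + PySem.Int.mod q3.2 (max (PySem.Int.floordiv w 3) 1)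
      let q4 := pvLcg q3.1
      let ph := 1 + PySem.Int.mod q4.2 (max (PySem.Int.floordiv h_ 3) 1)
      let cs := (PySem.List.pyRange 0 3 1).foldl
        (fun (t : Int × List Int) _ =>
          ((pvLcg t.1).1, t.2 ++ [PySem.Int.floordiv ((pvLcg t.1).2 * maxval) 255])) (q4.1, [])
      (cs.1, st.2 ++ [(px, py, pw, ph, cs.2)]))
    ((pvLcg (PySem.Int.bxor seed 0xDEADBEEF)).1, [])).2
  let rev := (patches.reverse.map (fun p =>
      (p.1, min (p.1 + p.2.2.1) w, p.2.1, min (p.2.1 + p.2.2.2.1) h_, p.2.2.2.2))).filter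
    (fun r => decide (r.1 < r.2.1) && decide (r.2.2.1 < r.2.2.2.1))
  ((PySem.List.pyRange 0 (w * h_ * c) 1).foldl
    (fun (st : Int × List Int) i =>
      ((pvLcg st.1).1, st.2 ++
        [let x := PySem.Int.mod (PySem.Int.floordiv i c) w
         let y := PySem.Int.floordiv (PySem.Int.floordiv i c) w
         -- 'for … in rev: if <covering>: …; break' is first-match search
         match rev.find? (fun r =>
             decide (r.1 ≤ x ∧ x < r.2.1 ∧ r.2.2.1 ≤ y ∧ y < r.2.2.2.1)) with
         | some r => PySem.List.pyGetD r.2.2.2.2 (min (PySem.Int.mod i c) 2) 0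
         | none => PySem.Int.floordiv ((pvLcg st.1).2 * maxval) 255]))
    (seed, [])).2

-- ===== PRECONDITION & SPEC =====
-- Pre_ excludes exactly the inputs where the Python A raises (ZeroDivisionError from px % w / py % h
-- in the patch loop, which always runs at least 6 times); B raises there too.
def Pre_gen_noise_patches (w : Int) (h_ : Int) (c : Int) (seed : Int) (maxval : Int) : Prop :=
  w ≠ 0 ∧ h_ ≠ 0
instance (w : Int) (h_ : Int) (c : Int) (seed : Int) (maxval : Int) : Decidable (Pre_gen_noise_patches w h_ c seed maxval) := by unfold Pre_gen_noise_patches; infer_instance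
def pvWitness_gen_noise_patches : Int × Int × Int × Int × Int := (2, 2, 1, 0, 255)

def Spec_gen_noise_patches (w : Int) (h_ : Int) (c : Int) (seed : Int) (maxval : Int) (out : List Int) : Prop := out = gen_noise_patches_alt w h_ c seed maxval
instance (w : Int) (h_ : Int) (c : Int) (seed : Int) (maxval : Int) (out : List Int) : Decidable (Spec_gen_noise_patches w h_ c seed maxval out) := by unfold Spec_gen_noise_patches; infer_instance

-- ===== CLAIM (what is proved, stated in full; the proofs are below) =====
def Claim_equal_gen_noise_patches : Prop := ∀ (w : Int) (h_ : Int) (c : Int) (seed : Int) (maxval : Int), Dom_gen_noise_patches w h_ c seed maxval → Pre_gen_noise_patches w h_ c seed maxval → Spec_gen_noise_patches w h_ c seed maxval (gen_noise_patches w h_ c seed maxval)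

-- ===== LEMMAS AND PROOFS =====

-- proof-side views of the two programs
def pvStream (pick : Int → Int → Int) : Int → List Int → List Int
  | _, [] => []
  | s, i :: t => pick i (pvLcg s).2 :: pvStream pick (pvLcg s).1 t

def pvClip (w h_ : Int) (p : Int × Int × Int × Int × List Int) :
    Int × Int × Int × Int × List Int :=
  (p.1, min (p.1 + p.2.2.1) w, p.2.1, min (p.2.1 + p.2.2.2.1) h_, p.2.2.2.2)

def pvKeep (r : Int × Int × Int × Int × List Int) : Bool :=
  decide (r.1 < r.2.1) && decide (r.2.2.1 < r.2.2.2.1)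

def pvRev (w h_ : Int) (ps : List (Int × Int × Int × Int × List Int)) :
    List (Int × Int × Int × Int × List Int) :=
  (ps.reverse.map (pvClip w h_)).filter pvKeep

def pvCovers (x y : Int) (r : Int × Int × Int × Int × List Int) : Bool :=
  decide (r.1 ≤ x ∧ x < r.2.1 ∧ r.2.2.1 ≤ y ∧ y < r.2.2.2.1)

def pvPick (w h_ c maxval : Int) (ps : List (Int × Int × Int × Int × List Int)) (i v : Int) : Int :=
  let x := PySem.Int.mod (PySem.Int.floordiv i c) w
  let y := PySem.Int.floordiv (PySem.Int.floordiv i c) w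
  match (pvRev w h_ ps).find? (pvCovers x y) with
  | some r => PySem.List.pyGetD r.2.2.2.2 (min (PySem.Int.mod i c) 2) 0
  | none => PySem.Int.floordiv (v * maxval) 255

def pvWrite (w h_ c px py pw ph : Int) (col out : List Int) : List Int :=
  (PySem.List.pyRange py (min (py + ph) h_) 1).foldl (fun o y =>
    (PySem.List.pyRange px (min (px + pw) w) 1).foldl (fun o2 x =>
      let idx := (y * w + x) * c
      (PySem.List.pyRange 0 c 1).foldl (fun o3 k =>
        PySem.List.pySetD o3 (idx + k) (PySem.List.pyGetD col (min k 2) 0)) o2) o) out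

def pvStepA (w h_ c maxval : Int) (st : Int × List Int) : Int × List Int :=
  let q1 := pvLcg st.1
  let px := PySem.Int.mod q1.2 w
  let q2 := pvLcg q1.1
  let py := PySem.Int.mod q2.2 h_
  let q3 := pvLcg q2.1
  let pw := 1 + PySem.Int.mod q3.2 (max (PySem.Int.floordiv w 3) 1)
  let q4 := pvLcg q3.1
  let ph := 1 + PySem.Int.mod q4.2 (max (PySem.Int.floordiv h_ 3) 1)
  let cs := (PySem.List.pyRange 0 3 1).foldl
    (fun (t : Int × List Int) _ =>
      ((pvLcg t.1).1, t.2 ++ [PySem.Int.floordiv ((pvLcg t.1).2 * maxval) 255])) (q4.1, [])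
  (cs.1, pvWrite w h_ c px py pw ph cs.2 st.2)

def pvStepB (w h_ c maxval : Int) (st : Int × List (Int × Int × Int × Int × List Int)) :
    Int × List (Int × Int × Int × Int × List Int) :=
  let q1 := pvLcg st.1
  let px := PySem.Int.mod q1.2 w
  let q2 := pvLcg q1.1
  let py := PySem.Int.mod q2.2 h_
  let q3 := pvLcg q2.1
  let pw := 1 + PySem.Int.mod q3.2 (max (PySem.Int.floordiv w 3) 1)
  let q4 := pvLcg q3.1
  let ph := 1 + PySem.Int.mod q4.2 (max (PySem.Int.floordiv h_ 3) 1)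
  let cs := (PySem.List.pyRange 0 3 1).foldl
    (fun (t : Int × List Int) _ =>
      ((pvLcg t.1).1, t.2 ++ [PySem.Int.floordiv ((pvLcg t.1).2 * maxval) 255])) (q4.1, [])
  (cs.1, st.2 ++ [(px, py, pw, ph, cs.2)])

def pvPatchesFinal (w h_ c seed maxval : Int) : List (Int × Int × Int × Int × List Int) :=
  ((PySem.List.pyRange 0 (6 + PySem.Int.mod (pvLcg (PySem.Int.bxor seed 0xDEADBEEF)).2 6) 1).foldl
    (fun st _ => pvStepB w h_ c maxval st)
    ((pvLcg (PySem.Int.bxor seed 0xDEADBEEF)).1, [])).2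

-- the joint invariant: out is the noise stream with covered positions substituted
def pvInv (w h_ c maxval seed : Int) (ps : List (Int × Int × Int × Int × List Int))
    (out : List Int) : Prop :=
  out.length = (w * h_ * c).toNat ∧
  ∀ j : Nat, j < (w * h_ * c).toNat →
    out.getD j 0 = pvPick w h_ c maxval ps (j : Int)
      ((pvStream (fun _ v => v) seed (PySem.List.pyRange 0 (w * h_ * c) 1)).getD j 0)

lemma pvA_eq (w h_ c seed maxval : Int) :
    gen_noise_patches w h_ c seed maxval =
    ((PySem.List.pyRange 0 (6 + PySem.Int.mod (pvLcg (PySem.Int.bxor seed 0xDEADBEEF)).2 6) 1).foldl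
      (fun st _ => pvStepA w h_ c maxval st)
      ((pvLcg (PySem.Int.bxor seed 0xDEADBEEF)).1, pvGenNoise w h_ c seed maxval)).2 := rfl

lemma pvStream_length (pick : Int → Int → Int) (l : List Int) :
    ∀ s : Int, (pvStream pick s l).length = l.length := by
  induction l with
  | nil => intro s; rfl
  | cons i t ih => intro s; simp [pvStream, ih]

lemma pvFold_stream (pick : Int → Int → Int) (l : List Int) :
    ∀ (s : Int) (acc : List Int),
    (l.foldl (fun (st : Int × List Int) i =>
      ((pvLcg st.1).1, st.2 ++ [pick i (pvLcg st.1).2])) (s, acc)).2 = acc ++ pvStream pick s l := by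
  induction l with
  | nil => intro s acc; simp [pvStream]
  | cons i t ih =>
    intro s acc
    simp only [List.foldl_cons, pvStream]
    rw [ih]
    simp

lemma pvB_eq (w h_ c seed maxval : Int) :
    gen_noise_patches_alt w h_ c seed maxval =
    pvStream (pvPick w h_ c maxval (pvPatchesFinal w h_ c seed maxval)) seed
      (PySem.List.pyRange 0 (w * h_ * c) 1) := by
  have h := pvFold_stream (pvPick w h_ c maxval (pvPatchesFinal w h_ c seed maxval))
    (PySem.List.pyRange 0 (w * h_ * c) 1) seed []
  rw [List.nil_append] at h
  exact h

lemma pvGenNoise_eq (w h_ c seed maxval : Int) :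
    pvGenNoise w h_ c seed maxval =
    pvStream (fun _ v => PySem.Int.floordiv (v * maxval) 255) seed
      (PySem.List.pyRange 0 (w * h_ * c) 1) := by
  have h := pvFold_stream (fun _ v => PySem.Int.floordiv (v * maxval) 255)
    (PySem.List.pyRange 0 (w * h_ * c) 1) seed []
  rw [List.nil_append] at h
  exact h

lemma pvStream_getD (pick : Int → Int → Int) (l : List Int) :
    ∀ (s : Int) (j : Nat), j < l.length →
    (pvStream pick s l).getD j 0 =
      pick (l.getD j 0) ((pvStream (fun _ v => v) s l).getD j 0) := by
  induction l with
  | nil => intro s j hj; simp at hj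
  | cons i t ih =>
    intro s j hj
    cases j with
    | zero => simp [pvStream]
    | succ n =>
      simp only [pvStream, List.getD_cons_succ]
      exact ih (pvLcg s).1 n (by simpa using hj)

-- base invariant
lemma pvInv_base (w h_ c seed maxval : Int) :
    pvInv w h_ c maxval seed [] (pvGenNoise w h_ c seed maxval) := by
  have hlenl : (PySem.List.pyRange 0 (w * h_ * c) 1).length = (w * h_ * c).toNat := by
    rw [PySem.List.length_pyRange_one]; simp
  constructor
  · rw [pvGenNoise_eq, pvStream_length, hlenl]
  · intro j hj
    rw [pvGenNoise_eq, pvStream_getD _ _ seed j (by rwa [hlenl])]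
    simp [pvPick, pvRev]

-- the clipped reverse view of one more patch at the end of the list
lemma pvRev_append (w h_ : Int) (ps : List (Int × Int × Int × Int × List Int))
    (p : Int × Int × Int × Int × List Int) :
    pvRev w h_ (ps ++ [p]) =
      if pvKeep (pvClip w h_ p) = true then pvClip w h_ p :: pvRev w h_ ps
      else pvRev w h_ ps := by
  unfold pvRev
  rw [List.reverse_append, List.reverse_singleton, List.singleton_append, List.map_cons,
    List.filter_cons]

-- a patch whose clipped rectangle is empty does not change any resolution
lemma pvPick_append_of_not_keep (w h_ c maxval : Int)
    (ps : List (Int × Int × Int × Int × List Int)) (p : Int × Int × Int × Int × List Int)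
    (i v : Int) (hk : pvKeep (pvClip w h_ p) = false) :
    pvPick w h_ c maxval (ps ++ [p]) i v = pvPick w h_ c maxval ps i v := by
  simp only [pvPick]
  rw [pvRev_append, hk, if_neg Bool.false_ne_true]

-- the innermost write loop (the k-channel loop), characterised elementwise
lemma pvWrite_inner (col : List Int) (idx c : Int) (h0 : 0 ≤ idx) :
    ∀ (n : Nat) (o : List Int), idx + n ≤ (o.length : Int) →
    (((List.range n).foldl (fun o3 (k : Nat) =>
        PySem.List.pySetD o3 (idx + (k : Int)) (PySem.List.pyGetD col (min (k : Int) 2) 0)) o).length = o.length) ∧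
    ∀ j : Nat,
      ((List.range n).foldl (fun o3 (k : Nat) =>
        PySem.List.pySetD o3 (idx + (k : Int)) (PySem.List.pyGetD col (min (k : Int) 2) 0)) o).getD j 0 =
      if idx ≤ (j : Int) ∧ (j : Int) < idx + n
      then PySem.List.pyGetD col (min ((j : Int) - idx) 2) 0 else o.getD j 0 := by
  intro n
  induction n with
  | zero =>
    intro o hn
    refine ⟨rfl, fun j => ?_⟩
    rw [if_neg (by push_cast; omega)]
    rfl
  | succ n ih =>
    intro o hn
    have hn' : idx + (n : Int) ≤ (o.length : Int) := by push_cast at hn ⊢; omega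
    obtain ⟨ihl, ihc⟩ := ih o hn'
    rw [List.range_succ, List.foldl_append, List.foldl_cons, List.foldl_nil]
    have hnn : (0 : Int) ≤ idx + (n : Int) := by positivity
    rw [PySem.List.pySetD_of_nonneg _ _ hnn]
    have htn : ((idx + (n : Int)).toNat : Int) = idx + (n : Int) := Int.toNat_of_nonneg hnn
    constructor
    · rw [List.length_set, ihl]
    · intro j
      by_cases hj : j = (idx + (n : Int)).toNat
      · have hjI : (j : Int) = idx + (n : Int) := by rw [hj]; exact htn
        have hjlt : j < ((List.range n).foldl (fun o3 (k : Nat) =>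
            PySem.List.pySetD o3 (idx + (k : Int)) (PySem.List.pyGetD col (min (k : Int) 2) 0)) o).length := by
          rw [ihl]; push_cast at hn; omega
        rw [List.getD_eq_getElem?_getD, show (idx + (n : Int)).toNat = j from hj.symm,
          List.getElem?_set_self hjlt, Option.getD_some,
          if_pos (show idx ≤ (j : Int) ∧ (j : Int) < idx + ((n : Nat) + 1 : Nat) by push_cast; omega),
          show (j : Int) - idx = (n : Int) by omega]
      · rw [List.getD_eq_getElem?_getD, List.getElem?_set_ne (fun hh => hj hh.symm),
          ← List.getD_eq_getElem?_getD, ihc j]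
        have hcond : (idx ≤ (j : Int) ∧ (j : Int) < idx + (n : Int)) ↔
            (idx ≤ (j : Int) ∧ (j : Int) < idx + ((n : Nat) + 1 : Nat)) := by
          have hne : (j : Int) ≠ idx + (n : Int) := by
            intro hcc; apply hj; omega
          push_cast
          omega
        rw [if_congr hcond rfl rfl]

-- division bracket ↔ decomposition of a flat index
lemma pvDecomp (w h_ c y x j : Int) (hw : 0 < w) (hh : 0 < h_) (hc : 0 < c)
    (hy0 : 0 ≤ y) (hy1 : y < h_) (hx0 : 0 ≤ x) (hx1 : x < w) (hj0 : 0 ≤ j) :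
    (((y * w + x) * c ≤ j ∧ j < (y * w + x) * c + c) ↔ (j / c / w = y ∧ j / c % w = x)) ∧
    (((y * w + x) * c ≤ j ∧ j < (y * w + x) * c + c) → j - (y * w + x) * c = j % c) := by
  have hring : (y * w + x + 1) * c = (y * w + x) * c + c := by ring
  have hq : ((y * w + x) * c ≤ j ∧ j < (y * w + x) * c + c) ↔ j / c = y * w + x := by
    constructor
    · rintro ⟨ha, hb⟩
      have h1 : y * w + x ≤ j / c := (Int.le_ediv_iff_mul_le hc).mpr ha
      have h2 : j / c < y * w + x + 1 := (Int.ediv_lt_iff_lt_mul hc).mpr (by linarith)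
      omega
    · intro hqv
      have ha := (Int.le_ediv_iff_mul_le hc).mp (le_of_eq hqv.symm)
      have hb := (Int.ediv_lt_iff_lt_mul hc).mp (show j / c < y * w + x + 1 by omega)
      exact ⟨ha, by linarith⟩
  have hqd : (j / c / w = y ∧ j / c % w = x) ↔ j / c = y * w + x := by
    constructor
    · rintro ⟨h1, h2⟩
      have h3 := Int.mul_ediv_add_emod (j / c) w
      rw [h1, h2] at h3
      linarith
    · intro hqv
      constructor
      · rw [hqv, show y * w + x = x + y * w by ring,
          Int.add_mul_ediv_right x y (ne_of_gt hw), Int.ediv_eq_zero_of_lt hx0 hx1]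
        ring
      · rw [hqv, show y * w + x = x + w * y by ring, Int.add_mul_emod_self_left,
          Int.emod_eq_of_lt hx0 hx1]
  refine ⟨hq.trans hqd.symm, fun hbr => ?_⟩
  have hqv := hq.mp hbr
  have h3 := Int.mul_ediv_add_emod j c
  rw [hqv] at h3
  have hcm : c * (y * w + x) = (y * w + x) * c := by ring
  linarith

-- one pixel row of writes (x loop, k loop inside), characterised elementwise
lemma pvWrite_mid (w h_ c : Int) (col : List Int) (hw : 0 < w) (hh : 0 < h_) (hc : 0 < c)
    (y : Int) (hy0 : 0 ≤ y) (hy1 : y < h_) :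
    ∀ (xr : List Int), (∀ x ∈ xr, 0 ≤ x ∧ x < w) →
    ∀ (o : List Int), (o.length : Int) = w * h_ * c →
    ((xr.foldl (fun o2 x =>
        let idx := (y * w + x) * c
        (PySem.List.pyRange 0 c 1).foldl (fun o3 k =>
          PySem.List.pySetD o3 (idx + k) (PySem.List.pyGetD col (min k 2) 0)) o2) o).length = o.length) ∧
    ∀ j : Nat, (j : Int) < w * h_ * c →
      (xr.foldl (fun o2 x =>
        let idx := (y * w + x) * c
        (PySem.List.pyRange 0 c 1).foldl (fun o3 k =>
          PySem.List.pySetD o3 (idx + k) (PySem.List.pyGetD col (min k 2) 0)) o2) o).getD j 0 =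
      if ((j : Int) / c / w = y ∧ ∃ x ∈ xr, (j : Int) / c % w = x)
      then PySem.List.pyGetD col (min ((j : Int) % c) 2) 0 else o.getD j 0 := by
  intro xr
  induction xr with
  | nil =>
    intro _ o hlen
    refine ⟨rfl, fun j hj => ?_⟩
    rw [List.foldl_nil, if_neg (by simp)]
  | cons x t ih =>
    intro hxr o hlen
    have hxb := hxr x (List.mem_cons_self ..)
    simp only [List.foldl_cons]
    have hidx0 : (0 : Int) ≤ (y * w + x) * c :=
      mul_nonneg (add_nonneg (mul_nonneg hy0 (le_of_lt hw)) hxb.1) (le_of_lt hc)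
    have e1 : y * w + x + 1 ≤ w * h_ := by
      nlinarith [mul_le_mul_of_nonneg_right (show y + 1 ≤ h_ by omega) (le_of_lt hw)]
    have hble : (y * w + x) * c + c ≤ w * h_ * c := by
      nlinarith [mul_le_mul_of_nonneg_right e1 (le_of_lt hc)]
    have hconv : ((PySem.List.pyRange 0 c 1).foldl (fun o3 k =>
        PySem.List.pySetD o3 ((y * w + x) * c + k) (PySem.List.pyGetD col (min k 2) 0)) o) =
        ((List.range c.toNat).foldl (fun o3 (k : Nat) =>
          PySem.List.pySetD o3 ((y * w + x) * c + (k : Int)) (PySem.List.pyGetD col (min (k : Int) 2) 0)) o) := by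
      rw [PySem.List.pyRange_one, List.foldl_map]
      simp only [zero_add, Int.sub_zero]
    obtain ⟨hl1, hc1⟩ := pvWrite_inner col ((y * w + x) * c) c hidx0 c.toNat o
      (by rw [Int.toNat_of_nonneg (le_of_lt hc), hlen]; linarith)
    rw [Int.toNat_of_nonneg (le_of_lt hc)] at hc1
    rw [← hconv] at hl1 hc1
    obtain ⟨hl2, hc2⟩ := ih (fun x' hx' => hxr x' (List.mem_cons_of_mem _ hx')) _
      (by rw [hl1]; exact hlen)
    refine ⟨by rw [hl2, hl1], fun j hj => ?_⟩
    rw [hc2 j hj]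
    have hj0 : (0 : Int) ≤ (j : Int) := Int.natCast_nonneg j
    have hdec := pvDecomp w h_ c y x j hw hh hc hy0 hy1 hxb.1 hxb.2 hj0
    have hcons := List.exists_mem_cons_iff (fun x' => (j : Int) / c % w = x') x t
    by_cases hct : ((j : Int) / c / w = y ∧ ∃ x' ∈ t, (j : Int) / c % w = x')
    · rw [if_pos hct, if_pos ⟨hct.1, hcons.mpr (Or.inr hct.2)⟩]
    · rw [if_neg hct, hc1 j]
      by_cases hcx : ((j : Int) / c / w = y ∧ (j : Int) / c % w = x)
      · rw [if_pos (hdec.1.mpr hcx), hdec.2 (hdec.1.mpr hcx),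
          if_pos ⟨hcx.1, hcons.mpr (Or.inl hcx.2)⟩]
      · have hnc : ¬((j : Int) / c / w = y ∧ ∃ x' ∈ x :: t, (j : Int) / c % w = x') := by
          rintro ⟨hy', hex⟩
          rcases hcons.mp hex with h | h
          · exact hcx ⟨hy', h⟩
          · exact hct ⟨hy', h⟩
        rw [if_neg (fun hbr => hcx (hdec.1.mp hbr)), if_neg hnc]

-- the y loop on top of the row writes
lemma pvWrite_out (w h_ c px pw : Int) (col : List Int) (hw : 0 < w) (hh : 0 < h_) (hc : 0 < c)
    (hpx0 : 0 ≤ px) :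
    ∀ (yr : List Int), (∀ y ∈ yr, 0 ≤ y ∧ y < h_) →
    ∀ (o : List Int), (o.length : Int) = w * h_ * c →
    ((yr.foldl (fun o y =>
        (PySem.List.pyRange px (min (px + pw) w) 1).foldl (fun o2 x =>
          let idx := (y * w + x) * c
          (PySem.List.pyRange 0 c 1).foldl (fun o3 k =>
            PySem.List.pySetD o3 (idx + k) (PySem.List.pyGetD col (min k 2) 0)) o2) o) o).length = o.length) ∧
    ∀ j : Nat, (j : Int) < w * h_ * c →
      (yr.foldl (fun o y =>
        (PySem.List.pyRange px (min (px + pw) w) 1).foldl (fun o2 x =>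
          let idx := (y * w + x) * c
          (PySem.List.pyRange 0 c 1).foldl (fun o3 k =>
            PySem.List.pySetD o3 (idx + k) (PySem.List.pyGetD col (min k 2) 0)) o2) o) o).getD j 0 =
      if ((∃ y ∈ yr, (j : Int) / c / w = y) ∧
          (∃ x ∈ PySem.List.pyRange px (min (px + pw) w) 1, (j : Int) / c % w = x))
      then PySem.List.pyGetD col (min ((j : Int) % c) 2) 0 else o.getD j 0 := by
  intro yr
  induction yr with
  | nil =>
    intro _ o hlen
    refine ⟨rfl, fun j hj => ?_⟩
    rw [List.foldl_nil, if_neg (by simp)]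
  | cons b t ih =>
    intro hyr o hlen
    have hyb := hyr b (List.mem_cons_self ..)
    simp only [List.foldl_cons]
    have hxrb : ∀ x ∈ PySem.List.pyRange px (min (px + pw) w) 1, 0 ≤ x ∧ x < w := by
      intro x hx
      rw [PySem.List.mem_pyRange_one] at hx
      exact ⟨le_trans hpx0 hx.1, lt_of_lt_of_le hx.2 (min_le_right _ _)⟩
    obtain ⟨hl1, hc1⟩ := pvWrite_mid w h_ c col hw hh hc b hyb.1 hyb.2
      (PySem.List.pyRange px (min (px + pw) w) 1) hxrb o hlen
    obtain ⟨hl2, hc2⟩ := ih (fun y' hy' => hyr y' (List.mem_cons_of_mem _ hy')) _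
      (by rw [hl1]; exact hlen)
    refine ⟨by rw [hl2, hl1], fun j hj => ?_⟩
    rw [hc2 j hj]
    by_cases hct : ((∃ y ∈ t, (j : Int) / c / w = y) ∧
        (∃ x ∈ PySem.List.pyRange px (min (px + pw) w) 1, (j : Int) / c % w = x))
    · obtain ⟨⟨y0, hy0m, hy0e⟩, hxe⟩ := hct
      rw [if_pos ⟨⟨y0, hy0m, hy0e⟩, hxe⟩,
        if_pos ⟨⟨y0, List.mem_cons_of_mem _ hy0m, hy0e⟩, hxe⟩]
    · rw [if_neg hct, hc1 j hj]
      by_cases hcb : ((j : Int) / c / w = b ∧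
          ∃ x ∈ PySem.List.pyRange px (min (px + pw) w) 1, (j : Int) / c % w = x)
      · rw [if_pos hcb, if_pos ⟨⟨b, List.mem_cons_self .., hcb.1⟩, hcb.2⟩]
      · have hnc : ¬((∃ y ∈ b :: t, (j : Int) / c / w = y) ∧
            (∃ x ∈ PySem.List.pyRange px (min (px + pw) w) 1, (j : Int) / c % w = x)) := by
          rintro ⟨⟨y0, hy0m, hy0e⟩, hxe⟩
          rcases List.mem_cons.mp hy0m with h | h
          · exact hcb ⟨h ▸ hy0e, hxe⟩
          · exact hct ⟨⟨y0, h, hy0e⟩, hxe⟩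
        rw [if_neg hcb, if_neg hnc]

-- the full write nest, characterised elementwise (main case)
lemma pvWrite_char (w h_ c px py pw ph : Int) (col : List Int)
    (hw : 0 < w) (hh : 0 < h_) (hc : 0 < c) (hpx0 : 0 ≤ px) (hpy0 : 0 ≤ py) (out : List Int)
    (hlen : (out.length : Int) = w * h_ * c) :
    ((pvWrite w h_ c px py pw ph col out).length = out.length) ∧
    ∀ j : Nat, (j : Int) < w * h_ * c →
      (pvWrite w h_ c px py pw ph col out).getD j 0 =
      if (px ≤ (j : Int) / c % w ∧ (j : Int) / c % w < min (px + pw) w) ∧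
         (py ≤ (j : Int) / c / w ∧ (j : Int) / c / w < min (py + ph) h_)
      then PySem.List.pyGetD col (min ((j : Int) % c) 2) 0 else out.getD j 0 := by
  have hyrb : ∀ y ∈ PySem.List.pyRange py (min (py + ph) h_) 1, 0 ≤ y ∧ y < h_ := by
    intro y hy
    rw [PySem.List.mem_pyRange_one] at hy
    exact ⟨le_trans hpy0 hy.1, lt_of_lt_of_le hy.2 (min_le_right _ _)⟩
  obtain ⟨hl, hcr⟩ := pvWrite_out w h_ c px pw col hw hh hc hpx0
    (PySem.List.pyRange py (min (py + ph) h_) 1) hyrb out hlen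
  unfold pvWrite
  refine ⟨hl, fun j hj => ?_⟩
  rw [hcr j hj]
  have h1 : (∃ y ∈ PySem.List.pyRange py (min (py + ph) h_) 1, (j : Int) / c / w = y) ↔
      (py ≤ (j : Int) / c / w ∧ (j : Int) / c / w < min (py + ph) h_) := by
    constructor
    · rintro ⟨y, hy, he⟩
      rw [PySem.List.mem_pyRange_one] at hy
      rw [he]; exact hy
    · intro hb
      exact ⟨_, by rw [PySem.List.mem_pyRange_one]; exact hb, rfl⟩
  have h2 : (∃ x ∈ PySem.List.pyRange px (min (px + pw) w) 1, (j : Int) / c % w = x) ↔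
      (px ≤ (j : Int) / c % w ∧ (j : Int) / c % w < min (px + pw) w) := by
    constructor
    · rintro ⟨x, hx, he⟩
      rw [PySem.List.mem_pyRange_one] at hx
      rw [he]; exact hx
    · intro hb
      exact ⟨_, by rw [PySem.List.mem_pyRange_one]; exact hb, rfl⟩
  by_cases hcnd : (px ≤ (j : Int) / c % w ∧ (j : Int) / c % w < min (px + pw) w) ∧
      (py ≤ (j : Int) / c / w ∧ (j : Int) / c / w < min (py + ph) h_)
  · rw [if_pos ⟨h1.mpr hcnd.2, h2.mpr hcnd.1⟩, if_pos hcnd]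
  · rw [if_neg (fun hcc => hcnd ⟨h2.mp hcc.2, h1.mp hcc.1⟩), if_neg hcnd]

-- one patch preserves the invariant (all sign cases)
lemma pvPatch_core (w h_ c maxval seed : Int) (hw : w ≠ 0) (hh : h_ ≠ 0)
    (px py pw ph : Int) (col : List Int)
    (hpxp : 0 < w → 0 ≤ px ∧ px < w) (hpyp : 0 < h_ → 0 ≤ py ∧ py < h_)
    (hpxn : w < 0 → w < px) (hpyn : h_ < 0 → h_ < py)
    (ps : List (Int × Int × Int × Int × List Int)) (out : List Int)
    (h : pvInv w h_ c maxval seed ps out) :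
    pvInv w h_ c maxval seed (ps ++ [(px, py, pw, ph, col)])
      (pvWrite w h_ c px py pw ph col out) := by
  rcases lt_or_gt_of_ne hh with hhn | hhp
  · -- h_ < 0 : the y range is empty, nothing is written and the patch covers nothing
    have hpy := hpyn hhn
    have hyr : PySem.List.pyRange py (min (py + ph) h_) 1 = [] :=
      PySem.List.pyRange_one_eq_nil (le_of_lt (lt_of_le_of_lt (min_le_right _ _) hpy))
    have hk : pvKeep (pvClip w h_ (px, py, pw, ph, col)) = false := by
      have h2 : ¬(py < min (py + ph) h_) := by
        have := min_le_right (py + ph) h_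
        omega
      simp [pvKeep, pvClip, h2]
    unfold pvWrite
    rw [hyr]
    simp only [List.foldl_nil]
    refine ⟨h.1, fun j hj => ?_⟩
    rw [pvPick_append_of_not_keep w h_ c maxval ps _ _ _ hk]
    exact h.2 j hj
  · rcases lt_or_gt_of_ne hw with hwn | hwp
    · -- w < 0 : the x range is empty and the patch covers nothing
      have hpx := hpxn hwn
      have hxr : PySem.List.pyRange px (min (px + pw) w) 1 = [] :=
        PySem.List.pyRange_one_eq_nil (le_of_lt (lt_of_le_of_lt (min_le_right _ _) hpx))
      have hk : pvKeep (pvClip w h_ (px, py, pw, ph, col)) = false := by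
        have h1 : ¬(px < min (px + pw) w) := by
          have := min_le_right (px + pw) w
          omega
        simp [pvKeep, pvClip, h1]
      unfold pvWrite
      simp only [hxr, List.foldl_nil, PySem.List.foldl_ignore]
      refine ⟨h.1, fun j hj => ?_⟩
      rw [pvPick_append_of_not_keep w h_ c maxval ps _ _ _ hk]
      exact h.2 j hj
    · rcases lt_trichotomy c 0 with hcn | hc0 | hcp
      · -- c < 0 : the channel range is empty and the output is empty
        have hkr : PySem.List.pyRange 0 c 1 = [] :=
          PySem.List.pyRange_one_eq_nil (le_of_lt hcn)
        have hm : (w * h_ * c).toNat = 0 := by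
          apply Int.toNat_of_nonpos
          nlinarith [mul_pos hwp hhp]
        refine ⟨?_, fun j hj => absurd (hm ▸ hj) (Nat.not_lt_zero j)⟩
        unfold pvWrite
        simp only [hkr, List.foldl_nil, PySem.List.foldl_ignore]
        exact h.1
      · -- c = 0
        subst hc0
        have hkr : PySem.List.pyRange 0 0 1 = [] := PySem.List.pyRange_one_eq_nil le_rfl
        have hm : (w * h_ * 0).toNat = 0 := by simp
        refine ⟨?_, fun j hj => absurd (hm ▸ hj) (Nat.not_lt_zero j)⟩
        unfold pvWrite
        simp only [hkr, List.foldl_nil, PySem.List.foldl_ignore]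
        exact h.1
      · -- main case 0 < w, 0 < h_, 0 < c
        obtain ⟨hlen, hchar⟩ := h
        have hnn : (0 : Int) ≤ w * h_ * c := by positivity
        have hlenI : (out.length : Int) = w * h_ * c := by
          rw [hlen]; exact Int.toNat_of_nonneg hnn
        have hpxb := hpxp hwp
        have hpyb := hpyp hhp
        obtain ⟨hwl, hwc⟩ := pvWrite_char w h_ c px py pw ph col hwp hhp hcp
          hpxb.1 hpyb.1 out hlenI
        refine ⟨by rw [hwl, hlen], fun j hj => ?_⟩
        have hjI : (j : Int) < w * h_ * c := by
          rw [← Int.toNat_of_nonneg hnn]; exact_mod_cast hj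
        rw [hwc j hjI, hchar j hj]
        simp only [pvPick, PySem.Int.floordiv_eq_ediv_of_pos hcp,
          PySem.Int.floordiv_eq_ediv_of_pos hwp, PySem.Int.mod_eq_emod_of_pos hwp,
          PySem.Int.mod_eq_emod_of_pos hcp]
        rw [pvRev_append]
        by_cases hpq : px < min (px + pw) w ∧ py < min (py + ph) h_
        · have hk : pvKeep (pvClip w h_ (px, py, pw, ph, col)) = true := by
            simp [pvKeep, pvClip, hpq.1, hpq.2]
          rw [hk, if_pos rfl]
          by_cases hc4 : (px ≤ (j : Int) / c % w ∧ (j : Int) / c % w < min (px + pw) w) ∧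
              (py ≤ (j : Int) / c / w ∧ (j : Int) / c / w < min (py + ph) h_)
          · have hb : pvCovers ((j : Int) / c % w) ((j : Int) / c / w)
                (pvClip w h_ (px, py, pw, ph, col)) = true := decide_eq_true
              (show px ≤ (j : Int) / c % w ∧ (j : Int) / c % w < min (px + pw) w ∧
                    py ≤ (j : Int) / c / w ∧ (j : Int) / c / w < min (py + ph) h_ from
                ⟨hc4.1.1, hc4.1.2, hc4.2.1, hc4.2.2⟩)
            rw [List.find?_cons_of_pos hb, if_pos hc4]
            rfl
          · have hb : pvCovers ((j : Int) / c % w) ((j : Int) / c / w)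
                (pvClip w h_ (px, py, pw, ph, col)) = false := decide_eq_false
              (show ¬(px ≤ (j : Int) / c % w ∧ (j : Int) / c % w < min (px + pw) w ∧
                      py ≤ (j : Int) / c / w ∧ (j : Int) / c / w < min (py + ph) h_) from
                fun hcc => hc4 ⟨⟨hcc.1, hcc.2.1⟩, ⟨hcc.2.2.1, hcc.2.2.2⟩⟩)
            rw [List.find?_cons_of_neg (by simp [hb]), if_neg hc4]
        · have hk : pvKeep (pvClip w h_ (px, py, pw, ph, col)) = false := by
            simp only [pvKeep, pvClip, Bool.and_eq_false_iff, decide_eq_false_iff_not]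
            tauto
          rw [hk, if_neg Bool.false_ne_true,
            if_neg (fun hcc => hpq ⟨lt_of_le_of_lt hcc.1.1 hcc.1.2,
              lt_of_le_of_lt hcc.2.1 hcc.2.2⟩)]

lemma pvStep_pres (w h_ c maxval seed : Int) (hw : w ≠ 0) (hh : h_ ≠ 0)
    (stA : Int × List Int) (stB : Int × List (Int × Int × Int × Int × List Int))
    (hfst : stA.1 = stB.1) (hinv : pvInv w h_ c maxval seed stB.2 stA.2) :
    (pvStepA w h_ c maxval stA).1 = (pvStepB w h_ c maxval stB).1 ∧
    pvInv w h_ c maxval seed (pvStepB w h_ c maxval stB).2 (pvStepA w h_ c maxval stA).2 := by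
  obtain ⟨s, outl⟩ := stA
  obtain ⟨s2, cov⟩ := stB
  have hs : s = s2 := hfst
  subst hs
  refine ⟨rfl, ?_⟩
  exact pvPatch_core w h_ c maxval seed hw hh _ _ _ _ _
    (fun h0 => ⟨PySem.Int.mod_nonneg _ h0, PySem.Int.mod_lt _ h0⟩)
    (fun h0 => ⟨PySem.Int.mod_nonneg _ h0, PySem.Int.mod_lt _ h0⟩)
    (fun h0 => (PySem.Int.mod_neg_bounds _ h0).1)
    (fun h0 => (PySem.Int.mod_neg_bounds _ h0).1)
    cov outl hinv

lemma pvJoint (w h_ c maxval seed : Int) (hw : w ≠ 0) (hh : h_ ≠ 0) (lp : List Int) :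
    ∀ (stA : Int × List Int) (stB : Int × List (Int × Int × Int × Int × List Int)),
    stA.1 = stB.1 → pvInv w h_ c maxval seed stB.2 stA.2 →
    (lp.foldl (fun st _ => pvStepA w h_ c maxval st) stA).1 =
      (lp.foldl (fun st _ => pvStepB w h_ c maxval st) stB).1 ∧
    pvInv w h_ c maxval seed (lp.foldl (fun st _ => pvStepB w h_ c maxval st) stB).2
      (lp.foldl (fun st _ => pvStepA w h_ c maxval st) stA).2 := by
  induction lp with
  | nil => intro stA stB h1 h2; exact ⟨h1, h2⟩
  | cons a t ih =>
    intro stA stB h1 h2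
    have hs := pvStep_pres w h_ c maxval seed hw hh stA stB h1 h2
    simpa using ih (pvStepA w h_ c maxval stA) (pvStepB w h_ c maxval stB) hs.1 hs.2

-- ===== VERDICT (by name: the statement is the Claim_ definition above) =====
theorem gen_noise_patches_spec : Claim_equal_gen_noise_patches := by
  intro w h_ c seed maxval _hDom hPre
  unfold Spec_gen_noise_patches
  obtain ⟨hw, hh⟩ := hPre
  have hj := pvJoint w h_ c maxval seed hw hh
    (PySem.List.pyRange 0 (6 + PySem.Int.mod (pvLcg (PySem.Int.bxor seed 0xDEADBEEF)).2 6) 1)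
    ((pvLcg (PySem.Int.bxor seed 0xDEADBEEF)).1, pvGenNoise w h_ c seed maxval)
    (((pvLcg (PySem.Int.bxor seed 0xDEADBEEF)).1, []) :
      Int × List (Int × Int × Int × Int × List Int))
    rfl (pvInv_base w h_ c seed maxval)
  obtain ⟨hlenA, hchar⟩ := hj.2
  rw [pvA_eq, pvB_eq]
  have hlenl : (PySem.List.pyRange 0 (w * h_ * c) 1).length = (w * h_ * c).toNat := by
    rw [PySem.List.length_pyRange_one]; simp
  apply List.ext_getElem
  · rw [hlenA, pvStream_length, hlenl]
  · intro j hj1 hj2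
    have hjm : j < (w * h_ * c).toNat := by rwa [hlenA] at hj1
    have e1 := hchar j hjm
    have e2 := pvStream_getD (pvPick w h_ c maxval (pvPatchesFinal w h_ c seed maxval))
      (PySem.List.pyRange 0 (w * h_ * c) 1) seed j (by rwa [hlenl])
    have hgl : (PySem.List.pyRange 0 (w * h_ * c) 1).getD j 0 = (j : Int) := by
      rw [List.getD_eq_getElem _ _ (by rwa [hlenl])]
      rw [PySem.List.getElem_pyRange_one]
      simp
    rw [hgl] at e2
    have hA : (((PySem.List.pyRange 0 (6 + PySem.Int.mod (pvLcg (PySem.Int.bxor seed 0xDEADBEEF)).2 6) 1).foldl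
      (fun st _ => pvStepA w h_ c maxval st)
      ((pvLcg (PySem.Int.bxor seed 0xDEADBEEF)).1, pvGenNoise w h_ c seed maxval)).2)[j] =
      (((PySem.List.pyRange 0 (6 + PySem.Int.mod (pvLcg (PySem.Int.bxor seed 0xDEADBEEF)).2 6) 1).foldl
      (fun st _ => pvStepA w h_ c maxval st)
      ((pvLcg (PySem.Int.bxor seed 0xDEADBEEF)).1, pvGenNoise w h_ c seed maxval)).2).getD j 0 :=
      (List.getD_eq_getElem _ _ hj1).symm
    rw [hA, e1]
    rw [List.getD_eq_getElem _ _ hj2] at e2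
    exact e2.symm
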